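-- pv_equiv track=rewrite | github.com/redyuan43/HPPE | src/hppe/refiner/filter.py | _is_sequential_digits
-- ===== SOURCE A (Python) =====
-- def _is_sequential_digits(digits: str) -> bool:
--     """
--     判断是否为连续数字
--
--     Args:
--         digits: 数字字符串
--
--     Returns:
--         是否为连续数字
--     """
--     if len(digits) < 4:
--         return False
--
--     # 转换为整数列表
--     try:
--         nums = [int(d) for d in digits]
--     except ValueError:
--         return False
--
--     # 检查递增连续
--     is_ascending = all(
--         nums[i+1] - nums[i] == 1
--         for i in range(len(nums) - 1)
--     )
--
--     # 检查递减连续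
--     is_descending = all(
--         nums[i] - nums[i+1] == 1
--         for i in range(len(nums) - 1)
--     )
--
--     return is_ascending or is_descending
-- ===== SOURCE B (Python) =====
-- def _is_sequential_digits(digits: str) -> bool:
--     if len(digits) < 4:
--         return False
--     if not all('0' <= c <= '9' for c in digits):
--         return False
--     nums = [ord(c) - ord('0') for c in digits]
--     start = nums[0]
--     return nums == list(range(start, start + len(nums))) or \
--         nums == list(range(start, start - len(nums), -1))
-- ===== Notes on version B (the rewrite author's own statement) =====
-- stated objective: simpler
-- what changed: Instead of A's two pairwise adjacent-difference scans over indices, B validates the digits with a range check and compares the digit list against the canonical ascending and descending runs generated from the first digit.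
import Mathlib
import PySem

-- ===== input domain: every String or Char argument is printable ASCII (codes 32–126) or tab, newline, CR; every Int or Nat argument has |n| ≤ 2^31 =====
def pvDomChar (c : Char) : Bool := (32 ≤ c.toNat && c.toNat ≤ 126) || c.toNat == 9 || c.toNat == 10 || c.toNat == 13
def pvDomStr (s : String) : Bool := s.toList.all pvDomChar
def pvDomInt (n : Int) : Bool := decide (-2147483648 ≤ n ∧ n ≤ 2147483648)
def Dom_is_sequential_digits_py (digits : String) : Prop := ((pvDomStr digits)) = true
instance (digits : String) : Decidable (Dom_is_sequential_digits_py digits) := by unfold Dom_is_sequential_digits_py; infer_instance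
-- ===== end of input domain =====

-- B replaces A's two pairwise-difference scans by building the canonical ascending/descending
-- run from the first digit and comparing whole lists (objective: simpler).

-- ===== PORT A =====
-- try: nums = [int(d) for d in digits] except ValueError → none
def pvParseA : List Char → Option (List Int)
  | [] => some []
  | c :: cs =>
    match PySem.Int.ofChars? [c], pvParseA cs with
    | some v, some vs => some (v :: vs)
    | _, _ => none

def is_sequential_digits_py (digits : String) : Bool :=
  if PySem.Str.len digits < 4 then false
  else
    match pvParseA digits.toList with
    | none => false
    | some nums =>
      let isAscending := (PySem.List.pyRange 0 ((nums.length : Int) - 1) 1).all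
        (fun i => PySem.List.pyGetD nums (i + 1) 0 - PySem.List.pyGetD nums i 0 == 1)
      let isDescending := (PySem.List.pyRange 0 ((nums.length : Int) - 1) 1).all
        (fun i => PySem.List.pyGetD nums i 0 - PySem.List.pyGetD nums (i + 1) 0 == 1)
      isAscending || isDescending

-- ===== PORT B =====
def is_sequential_digits_py_alt (digits : String) : Bool :=
  let cs := digits.toList
  if cs.length < 4 then false
  else if !(cs.all fun c => decide ('0' ≤ c) && decide (c ≤ '9')) then false
  else
    let nums : List Int := cs.map fun c => (c.toNat : Int) - 48
    let start := PySem.List.pyGetD nums 0 0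
    (nums == PySem.List.pyRange start (start + (nums.length : Int)) 1) ||
      (nums == PySem.List.pyRange start (start - (nums.length : Int)) (-1))

-- ===== PRECONDITION & SPEC =====
def Spec_is_sequential_digits_py (digits : String) (out : Bool) : Prop := out = is_sequential_digits_py_alt digits
instance (digits : String) (out : Bool) : Decidable (Spec_is_sequential_digits_py digits out) := by unfold Spec_is_sequential_digits_py; infer_instance

-- ===== CLAIM (what is proved, stated in full; the proofs are below) =====
def Claim_equal_is_sequential_digits_py : Prop := ∀ (digits : String), Dom_is_sequential_digits_py digits → Spec_is_sequential_digits_py digits (is_sequential_digits_py digits)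

-- ===== LEMMAS AND PROOFS =====

-- int(d) on a single domain char: a value iff the char is an ASCII digit
theorem pvCharParse (c : Char) (h : pvDomChar c = true) :
    PySem.Int.ofChars? [c] =
      (if decide ('0' ≤ c) && decide (c ≤ '9') then some ((c.toNat : Int) - 48) else none) := by
  have key : ∀ n : Fin 128, PySem.Int.ofChars? [Char.ofNat n] =
      (if 48 ≤ (n : Nat) ∧ (n : Nat) ≤ 57 then some (((n : Nat) : Int) - 48) else none) := by
    decide
  have hle : c.toNat < 128 := by
    simp only [pvDomChar, Bool.or_eq_true, Bool.and_eq_true, decide_eq_true_eq, beq_iff_eq] at h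
    omega
  have hc : Char.ofNat c.toNat = c := Char.ofNat_toNat c
  have hk := key ⟨c.toNat, hle⟩
  simp only [hc] at hk
  rw [hk]
  have hiff : ('0' ≤ c ∧ c ≤ '9') ↔ (48 ≤ c.toNat ∧ c.toNat ≤ 57) := by
    constructor
    · rintro ⟨h1, h2⟩; exact ⟨h1, h2⟩
    · rintro ⟨h1, h2⟩; exact ⟨h1, h2⟩
  by_cases hd : 48 ≤ c.toNat ∧ c.toNat ≤ 57
  · have := hiff.mpr hd
    simp [hd, this.1, this.2]
  · have hnd : ¬ ('0' ≤ c ∧ c ≤ '9') := fun hh => hd (hiff.mp hh)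
    simp only [if_neg hd]
    rw [if_neg]
    intro hcon
    simp only [Bool.and_eq_true, decide_eq_true_eq] at hcon
    exact hnd hcon

theorem pvParseA_eq (cs : List Char) (h : cs.all pvDomChar = true) :
    pvParseA cs =
      (if cs.all (fun c => decide ('0' ≤ c) && decide (c ≤ '9')) then
        some (cs.map fun c => (c.toNat : Int) - 48) else none) := by
  induction cs with
  | nil => simp [pvParseA]
  | cons c cs ih =>
    simp only [List.all_cons, Bool.and_eq_true] at h
    rw [show pvParseA (c :: cs) = (match PySem.Int.ofChars? [c], pvParseA cs with
        | some v, some vs => some (v :: vs)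
        | _, _ => none) from rfl]
    rw [pvCharParse c h.1, ih h.2]
    by_cases h1 : (decide ('0' ≤ c) && decide (c ≤ '9')) = true
    · by_cases h2 : cs.all (fun c => decide ('0' ≤ c) && decide (c ≤ '9')) = true
      · simp [h1, h2]
      · simp [h1, h2]
    · simp [h1]

-- the adjacent-pair generator as a recursive chain predicate
def pvChain (f : Int → Int → Bool) : List Int → Bool
  | a :: b :: t => f a b && pvChain f (b :: t)
  | _ => true

theorem pvNat_chain (f : Int → Int → Bool) (nums : List Int) :
    (List.range (nums.length - 1)).all (fun k => f (nums.getD k 0) (nums.getD (k + 1) 0)) =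
      pvChain f nums := by
  induction nums with
  | nil => simp [pvChain]
  | cons a t ih =>
    match t with
    | [] => simp [pvChain]
    | b :: t' =>
      have hlen : (a :: b :: t').length - 1 = ((b :: t').length - 1) + 1 := by
        simp
      rw [hlen, List.range_succ_eq_map]
      rw [show pvChain f (a :: b :: t') = (f a b && pvChain f (b :: t')) from rfl]
      simp only [List.all_cons, List.all_map]
      rw [← ih]
      rfl

theorem pvAll_range_eq_chain (f : Int → Int → Bool) (nums : List Int) :
    ((PySem.List.pyRange 0 ((nums.length : Int) - 1) 1).all
      (fun i => f (PySem.List.pyGetD nums i 0) (PySem.List.pyGetD nums (i + 1) 0))) =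
    pvChain f nums := by
  rw [PySem.List.pyRange_one, List.all_map]
  have hcast : (((nums.length : Int) - 1) - 0).toNat = nums.length - 1 := by omega
  rw [hcast]
  have h2 : ∀ k : Nat, PySem.List.pyGetD nums ((k : Int) + 1) 0 = nums.getD (k + 1) 0 := by
    intro k
    rw [show ((k : Int) + 1) = (((k + 1 : Nat)) : Int) by push_cast; ring]
    rw [PySem.List.pyGetD_natCast]
  have h1 : ∀ k : Nat, PySem.List.pyGetD nums ((k : Int)) 0 = nums.getD k 0 := by
    intro k; rw [PySem.List.pyGetD_natCast]
  have hnat := pvNat_chain f nums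
  simp only [Function.comp_def, zero_add, h1, h2]
  exact hnat

theorem pvAll_asc (nums : List Int) :
    ((PySem.List.pyRange 0 ((nums.length : Int) - 1) 1).all
      (fun i => PySem.List.pyGetD nums (i + 1) 0 - PySem.List.pyGetD nums i 0 == 1)) =
    pvChain (fun x y => y - x == 1) nums :=
  pvAll_range_eq_chain (fun x y => y - x == 1) nums

theorem pvAll_desc (nums : List Int) :
    ((PySem.List.pyRange 0 ((nums.length : Int) - 1) 1).all
      (fun i => PySem.List.pyGetD nums i 0 - PySem.List.pyGetD nums (i + 1) 0 == 1)) =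
    pvChain (fun x y => x - y == 1) nums :=
  pvAll_range_eq_chain (fun x y => x - y == 1) nums

theorem pvChain_asc (a : Int) (t : List Int) :
    (pvChain (fun x y => y - x == 1) (a :: t) = true) ↔
      a :: t = PySem.List.pyRange a (a + ((t.length : Int) + 1)) 1 := by
  induction t generalizing a with
  | nil =>
    simp only [pvChain, List.length_nil, Nat.cast_zero, zero_add]
    rw [PySem.List.pyRange_one_singleton]
    simp
  | cons b t' ih =>
    rw [show pvChain (fun x y => y - x == 1) (a :: b :: t') =
        ((b - a == 1) && pvChain (fun x y => y - x == 1) (b :: t')) from rfl]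
    rw [show (((b :: t').length : Int) + 1) = ((t'.length : Int) + 1) + 1 by push_cast [List.length_cons]; ring]
    rw [PySem.List.pyRange_one_cons (by omega)]
    constructor
    · intro h
      simp only [Bool.and_eq_true, beq_iff_eq] at h
      have hb : b = a + 1 := by omega
      have hrec := (ih b).mp h.2
      rw [List.cons_eq_cons]
      refine ⟨rfl, ?_⟩
      rw [hrec, hb]
      congr 1
      omega
    · intro h
      rw [List.cons_eq_cons] at h
      have hb : b = a + 1 := by
        have h2 := h.2
        rw [PySem.List.pyRange_one_cons (by omega)] at h2
        exact (List.cons_eq_cons.mp h2).1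
      simp only [Bool.and_eq_true, beq_iff_eq]
      refine ⟨by omega, (ih b).mpr ?_⟩
      rw [h.2]
      congr 1 <;> omega

theorem pvChain_desc (a : Int) (t : List Int) :
    (pvChain (fun x y => x - y == 1) (a :: t) = true) ↔
      a :: t = PySem.List.pyRange a (a - ((t.length : Int) + 1)) (-1) := by
  induction t generalizing a with
  | nil =>
    simp only [pvChain, List.length_nil, Nat.cast_zero, zero_add]
    rw [PySem.List.pyRange_neg_one_cons (by omega)]
    rw [PySem.List.pyRange_neg_one_eq_nil (by omega)]
    simp
  | cons b t' ih =>
    rw [show pvChain (fun x y => x - y == 1) (a :: b :: t') =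
        ((a - b == 1) && pvChain (fun x y => x - y == 1) (b :: t')) from rfl]
    rw [show (((b :: t').length : Int) + 1) = ((t'.length : Int) + 1) + 1 by push_cast [List.length_cons]; ring]
    rw [PySem.List.pyRange_neg_one_cons (by omega)]
    constructor
    · intro h
      simp only [Bool.and_eq_true, beq_iff_eq] at h
      have hb : b = a - 1 := by omega
      have hrec := (ih b).mp h.2
      rw [List.cons_eq_cons]
      refine ⟨rfl, ?_⟩
      rw [hrec, hb]
      congr 1
      omega
    · intro h
      rw [List.cons_eq_cons] at h
      have hb : b = a - 1 := by
        have h2 := h.2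
        rw [PySem.List.pyRange_neg_one_cons (by omega)] at h2
        exact (List.cons_eq_cons.mp h2).1
      simp only [Bool.and_eq_true, beq_iff_eq]
      refine ⟨by omega, (ih b).mpr ?_⟩
      rw [h.2]
      congr 1 <;> omega

-- ===== VERDICT (by name: the statement is the Claim_ definition above) =====
theorem is_sequential_digits_py_spec : Claim_equal_is_sequential_digits_py := by
  intro digits hdom
  unfold Spec_is_sequential_digits_py
  unfold Dom_is_sequential_digits_py pvDomStr at hdom
  unfold is_sequential_digits_py is_sequential_digits_py_alt
  rw [PySem.Str.len_eq]
  by_cases hlen : digits.toList.length < 4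
  · rw [if_pos (by exact_mod_cast hlen), if_pos hlen]
  · rw [if_neg (by exact_mod_cast hlen), if_neg hlen]
    rw [pvParseA_eq digits.toList hdom]
    by_cases hdig : digits.toList.all (fun c => decide ('0' ≤ c) && decide (c ≤ '9')) = true
    · rw [if_pos hdig]
      simp only [hdig, Bool.not_true, Bool.false_eq_true, if_false]
      obtain ⟨c, cs, hcs⟩ : ∃ c cs, digits.toList = c :: cs := by
        cases h' : digits.toList with
        | nil => rw [h'] at hlen; simp at hlen
        | cons c cs => exact ⟨c, cs, rfl⟩
      rw [hcs]
      simp only [List.map_cons]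
      rw [pvAll_asc, pvAll_desc]
      rw [PySem.List.pyGetD_zero_cons]
      have hasc : pvChain (fun x y => y - x == 1)
            (((c.toNat : Int) - 48) :: cs.map fun c => (c.toNat : Int) - 48) =
          ((((c.toNat : Int) - 48) :: cs.map fun c => (c.toNat : Int) - 48) ==
            PySem.List.pyRange ((c.toNat : Int) - 48)
              (((c.toNat : Int) - 48) +
                ((((c.toNat : Int) - 48) :: cs.map fun c => (c.toNat : Int) - 48).length : Int)) 1) := by
        rw [Bool.eq_iff_iff, beq_iff_eq]
        rw [show ((((c.toNat : Int) - 48) :: cs.map fun c => (c.toNat : Int) - 48).length : Int) =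
            (((cs.map fun c => (c.toNat : Int) - 48).length : Int) + 1) by simp]
        exact pvChain_asc _ _
      have hdesc : pvChain (fun x y => x - y == 1)
            (((c.toNat : Int) - 48) :: cs.map fun c => (c.toNat : Int) - 48) =
          ((((c.toNat : Int) - 48) :: cs.map fun c => (c.toNat : Int) - 48) ==
            PySem.List.pyRange ((c.toNat : Int) - 48)
              (((c.toNat : Int) - 48) -
                ((((c.toNat : Int) - 48) :: cs.map fun c => (c.toNat : Int) - 48).length : Int)) (-1)) := by
        rw [Bool.eq_iff_iff, beq_iff_eq]
        rw [show ((((c.toNat : Int) - 48) :: cs.map fun c => (c.toNat : Int) - 48).length : Int) =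
            (((cs.map fun c => (c.toNat : Int) - 48).length : Int) + 1) by simp]
        exact pvChain_desc _ _
      rw [hasc, hdesc]
    · rw [if_neg hdig]
      simp [hdig]
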